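-- pv_equiv track=rewrite | github.com/ppsmk388/TC_project | search_dev/talent_search_modules/author_discovery.py | build_author_queries
-- ===== SOURCE A (Python) =====
-- from typing import List, Dict, Any, Tuple, Optional
--
-- PLATFORM_QUERIES = [
--     # 个人主页 - 最高优先级
--     '{q} site:github.io',
--     '{q} "personal website" OR "homepage"',
--     '{q} site:x.com',
--     '{q} site:linkedin.com/in',
--     '{q} site:researchgate.net/profile',
--     '{q} site:github.com',
--     '{q} site:huggingface.co',
--
--     # 学术平台 - 高优先级，精确匹配
--     '{q} site:openreview.net/profile',
--     '{q} site:scholar.google.com/citations',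
--     '{q} site:orcid.org',
--     '{q} site:semanticscholar.org/author',
--     '{q} site:dblp.org/pid',
--     '{q} site:dblp.org/pers',
--
--
-- ]
--
-- NOTABLE_QUERIES = [
--     '{q} "best paper" OR "outstanding paper" OR "paper award"',
--     '{q} "fellow" OR "IEEE fellow" OR "ACM fellow"',
--     '{q} "rising star" OR "young researcher award"',
--     '{q} "keynote" OR "invited speaker"',
--     '{q} "distinguished" OR "excellence award"'
-- ]
--
-- def build_author_queries(first_author: str, paper_title: str, aliases: List[str] = None,
--                         include_notable: bool = True) -> List[str]:
--     """Build comprehensive and precise search queries for author discovery"""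
--     aliases = aliases or []
--     name_variants = [first_author] + aliases
--     base = []
--
--     for nm in name_variants:
--         # 核心查询：作者名 + 论文名
--         name_paper_q = f'"{nm}" "{paper_title}"'
--         # 作者名查询
--         name_q = f'"{nm}"'
--
--         # 平台特定查询
--         for tpl in PLATFORM_QUERIES:
--             # 优先使用名字+论文的查询
--             if "x.com" in tpl or "twitter.com" in tpl or "linkedin.com" in tpl or "researchgate.net" in tpl or "huggingface.co" in tpl:
--                 # 然后使用只有名字的查询（更广泛）
--                 base.append(tpl.format(q=name_q))
--             else:
--                 base.append(tpl.format(q=name_paper_q))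
--
--
--         # 添加Notable信息查询
--         if include_notable:
--             for notable_tpl in NOTABLE_QUERIES:
--                 base.append(notable_tpl.format(q=name_q))
--
--     # 去重并排序（优先级排序）
--     seen, out = set(), []
--
--     # 第一优先级：个人主页
--     priority_0 = [q for q in base if any(site in q for site in ['github.io', 'github.com', 'personal', 'homepage', 'x.com', 'twitter.com', 'linkedin.com', 'researchgate.net', 'huggingface.co'])
--                   and paper_title in q]
--
--     # 第一优先级：学术平台 + 名字+论文
--     priority_1 = [q for q in base if any(site in q for site in
--                   ['openreview.net', 'semanticscholar.org', 'scholar.google.com', 'orcid.org'])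
--                   and paper_title in q]
--
--     # 第二优先级：机构页面 + 名字+论文
--     priority_2 = [q for q in base if any(site in q for site in
--                   ['site:edu', 'site:ac.'])
--                   and paper_title in q]
--
--     # 第三优先级：学术平台 + 只有名字
--     priority_3 = [q for q in base if any(site in q for site in
--                   ['openreview.net', 'semanticscholar.org', 'scholar.google.com', 'orcid.org'])
--                   and paper_title not in q and not any(notable in q for notable in
--                   ['award', 'fellow', 'best paper'])]
--
--     # 第四优先级：Notable查询
--     priority_4 = [q for q in base if any(notable in q for notable in
--                   ['award', 'fellow', 'best paper', 'rising star', 'keynote'])]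
--
--     # 第五优先级：其他查询
--     priority_5 = [q for q in base if q not in priority_0 + priority_1 + priority_2 + priority_3 + priority_4]
--
--     # 按优先级合并
--     for priority_list in [priority_0, priority_1, priority_2, priority_3, priority_4, priority_5]:
--         for q in priority_list:
--             if q not in seen and len(out) < 150:  # 增加查询数量限制
--                 seen.add(q)
--                 out.append(q)
--
--     return out
-- ===== SOURCE B (Python) =====
-- PLATFORM_QUERIES = [
--     '{q} site:github.io',
--     '{q} "personal website" OR "homepage"',
--     '{q} site:x.com',
--     '{q} site:linkedin.com/in',
--     '{q} site:researchgate.net/profile',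
--     '{q} site:github.com',
--     '{q} site:huggingface.co',
--     '{q} site:openreview.net/profile',
--     '{q} site:scholar.google.com/citations',
--     '{q} site:orcid.org',
--     '{q} site:semanticscholar.org/author',
--     '{q} site:dblp.org/pid',
--     '{q} site:dblp.org/pers',
-- ]
--
-- NOTABLE_QUERIES = [
--     '{q} "best paper" OR "outstanding paper" OR "paper award"',
--     '{q} "fellow" OR "IEEE fellow" OR "ACM fellow"',
--     '{q} "rising star" OR "young researcher award"',
--     '{q} "keynote" OR "invited speaker"',
--     '{q} "distinguished" OR "excellence award"'
-- ]
--
-- PERSONAL_SITES = ['github.io', 'github.com', 'personal', 'homepage', 'x.com',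
--                   'twitter.com', 'linkedin.com', 'researchgate.net', 'huggingface.co']
-- ACADEMIC_SITES = ['openreview.net', 'semanticscholar.org', 'scholar.google.com', 'orcid.org']
-- EDU_SITES = ['site:edu', 'site:ac.']
-- NOTABLE_3 = ['award', 'fellow', 'best paper']
-- NOTABLE_5 = ['award', 'fellow', 'best paper', 'rising star', 'keynote']
-- NAME_ONLY_SITES = ['x.com', 'twitter.com', 'linkedin.com', 'researchgate.net', 'huggingface.co']
--
--
-- def build_author_queries(first_author: str, paper_title: str, aliases=None,
--                          include_notable: bool = True):
--     """Counting-sort variant: each generated query gets its minimal priority key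
--     0-5 in one pass, buckets are then chained once with a seen-set and a 150 cap."""
--     base = []
--     for nm in [first_author] + (aliases or []):
--         name_q = f'"{nm}"'
--         name_paper_q = f'"{nm}" "{paper_title}"'
--         for tpl in PLATFORM_QUERIES:
--             name_only = any(s in tpl for s in NAME_ONLY_SITES)
--             base.append(tpl.format(q=name_q if name_only else name_paper_q))
--         if include_notable:
--             for tpl in NOTABLE_QUERIES:
--                 base.append(tpl.format(q=name_q))
--
--     def key(q):
--         title_in = paper_title in q
--         academic = any(s in q for s in ACADEMIC_SITES)
--         if any(s in q for s in PERSONAL_SITES) and title_in: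
--             return 0
--         if academic and title_in:
--             return 1
--         if any(s in q for s in EDU_SITES) and title_in:
--             return 2
--         if academic and not title_in and not any(n in q for n in NOTABLE_3):
--             return 3
--         if any(n in q for n in NOTABLE_5):
--             return 4
--         return 5
--
--     buckets = [[], [], [], [], [], []]
--     for q in base:
--         buckets[key(q)].append(q)
--
--     seen, out = set(), []
--     for bucket in buckets:
--         for q in bucket:
--             if q not in seen and len(out) < 150:
--                 seen.add(q)
--                 out.append(q)
--     return out
-- ===== Notes on version B (the rewrite author's own statement) =====
-- stated objective: faster
-- what changed: A builds six overlapping priority lists by re-filtering base six times (priority_5 via a quadratic 'q not in p0+...+p4' list scan) and then merges them with dedup; B assigns each query its minimal priority key 0-5 in one pass, bucket-sorts by that key, and chains the six buckets once through the same seen-set/150-cap loop.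
import Mathlib
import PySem

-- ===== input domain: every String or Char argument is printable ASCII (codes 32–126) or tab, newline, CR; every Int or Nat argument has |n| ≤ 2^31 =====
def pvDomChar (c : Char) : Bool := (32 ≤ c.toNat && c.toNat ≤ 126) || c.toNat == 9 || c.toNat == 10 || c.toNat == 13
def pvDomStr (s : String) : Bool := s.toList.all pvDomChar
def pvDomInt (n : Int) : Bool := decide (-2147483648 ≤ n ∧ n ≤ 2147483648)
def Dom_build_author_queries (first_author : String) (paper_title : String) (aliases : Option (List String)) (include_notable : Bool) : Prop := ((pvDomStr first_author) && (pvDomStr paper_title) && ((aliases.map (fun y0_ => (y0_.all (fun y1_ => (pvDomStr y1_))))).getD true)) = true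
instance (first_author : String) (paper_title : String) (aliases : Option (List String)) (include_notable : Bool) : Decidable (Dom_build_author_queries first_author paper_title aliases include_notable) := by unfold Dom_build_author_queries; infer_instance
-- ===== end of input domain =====

-- B replaces A's six filter passes (and the quadratic membership scan behind priority_5) by a
-- single keyed bucketing pass (minimal priority key 0-5, counting sort) before the same dedup/cap merge.


-- ===== PORT A =====
def pvPLATFORM_QUERIES : List String :=
  ["{q} site:github.io",
   "{q} \"personal website\" OR \"homepage\"",
   "{q} site:x.com",
   "{q} site:linkedin.com/in",
   "{q} site:researchgate.net/profile",
   "{q} site:github.com",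
   "{q} site:huggingface.co",
   "{q} site:openreview.net/profile",
   "{q} site:scholar.google.com/citations",
   "{q} site:orcid.org",
   "{q} site:semanticscholar.org/author",
   "{q} site:dblp.org/pid",
   "{q} site:dblp.org/pers"]

def pvNOTABLE_QUERIES : List String :=
  ["{q} \"best paper\" OR \"outstanding paper\" OR \"paper award\"",
   "{q} \"fellow\" OR \"IEEE fellow\" OR \"ACM fellow\"",
   "{q} \"rising star\" OR \"young researcher award\"",
   "{q} \"keynote\" OR \"invited speaker\"",
   "{q} \"distinguished\" OR \"excellence award\""]

-- f'"{nm}"' (plain concatenation over the code points — exact)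
def pvFmtName (nm : String) : String := String.ofList ('"' :: nm.toList ++ ['"'])
-- f'"{nm}" "{paper_title}"' — exact
def pvFmtNamePaper (nm pt : String) : String :=
  String.ofList ('"' :: nm.toList ++ ['"', ' ', '"'] ++ pt.toList ++ ['"'])
-- tpl.format(q=x): every template above contains exactly one '{q}' and no other braces,
-- so str.format coincides with str.replace on these templates — exact
def pvFormat (tpl q : String) : String := PySem.Str.replace tpl "{q}" q

def pvBaseA (first_author paper_title : String) (aliases : Option (List String)) (include_notable : Bool) : List String :=
  let name_variants := first_author :: (aliases.getD [])   -- `aliases = aliases or []` (None → [], [] → [])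
  name_variants.foldl (fun base nm =>
    let name_paper_q := pvFmtNamePaper nm paper_title
    let name_q := pvFmtName nm
    let base := pvPLATFORM_QUERIES.foldl (fun b tpl =>
      if PySem.Str.isIn "x.com" tpl || PySem.Str.isIn "twitter.com" tpl ||
         PySem.Str.isIn "linkedin.com" tpl || PySem.Str.isIn "researchgate.net" tpl ||
         PySem.Str.isIn "huggingface.co" tpl then
        b ++ [pvFormat tpl name_q]
      else
        b ++ [pvFormat tpl name_paper_q]) base
    if include_notable then
      pvNOTABLE_QUERIES.foldl (fun b tpl => b ++ [pvFormat tpl name_q]) base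
    else base) []

def pvP0 (pt q : String) : Bool :=
  (["github.io", "github.com", "personal", "homepage", "x.com", "twitter.com",
    "linkedin.com", "researchgate.net", "huggingface.co"].any (fun site => PySem.Str.isIn site q))
  && PySem.Str.isIn pt q

def pvP1 (pt q : String) : Bool :=
  (["openreview.net", "semanticscholar.org", "scholar.google.com", "orcid.org"].any
    (fun site => PySem.Str.isIn site q)) && PySem.Str.isIn pt q

def pvP2 (pt q : String) : Bool :=
  (["site:edu", "site:ac."].any (fun site => PySem.Str.isIn site q)) && PySem.Str.isIn pt q

def pvP3 (pt q : String) : Bool :=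
  (["openreview.net", "semanticscholar.org", "scholar.google.com", "orcid.org"].any
    (fun site => PySem.Str.isIn site q))
  && !(PySem.Str.isIn pt q)
  && !(["award", "fellow", "best paper"].any (fun notable => PySem.Str.isIn notable q))

def pvP4 (q : String) : Bool :=
  ["award", "fellow", "best paper", "rising star", "keynote"].any
    (fun notable => PySem.Str.isIn notable q)

def build_author_queries (first_author : String) (paper_title : String) (aliases : Option (List String)) (include_notable : Bool) : List String :=
  let base := pvBaseA first_author paper_title aliases include_notable
  let priority_0 := base.filter (fun q => pvP0 paper_title q)
  let priority_1 := base.filter (fun q => pvP1 paper_title q)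
  let priority_2 := base.filter (fun q => pvP2 paper_title q)
  let priority_3 := base.filter (fun q => pvP3 paper_title q)
  let priority_4 := base.filter (fun q => pvP4 q)
  let priority_5 := base.filter (fun q =>
    !((priority_0 ++ priority_1 ++ priority_2 ++ priority_3 ++ priority_4).contains q))
  (([priority_0, priority_1, priority_2, priority_3, priority_4, priority_5]).foldl
    (fun st priority_list => priority_list.foldl
      (fun st q =>
        if !(PySem.Set.contains st.1 q) && st.2.length < 150 then
          (PySem.Set.add st.1 q, st.2 ++ [q])
        else st) st)
    ((PySem.Set.empty : PySem.Set String), ([] : List String))).2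

-- ===== PORT B =====
def pvPERSONAL_SITES : List String :=
  ["github.io", "github.com", "personal", "homepage", "x.com", "twitter.com",
   "linkedin.com", "researchgate.net", "huggingface.co"]
def pvACADEMIC_SITES : List String :=
  ["openreview.net", "semanticscholar.org", "scholar.google.com", "orcid.org"]
def pvEDU_SITES : List String := ["site:edu", "site:ac."]
def pvNOTABLE_3 : List String := ["award", "fellow", "best paper"]
def pvNOTABLE_5 : List String := ["award", "fellow", "best paper", "rising star", "keynote"]
def pvNAME_ONLY_SITES : List String :=
  ["x.com", "twitter.com", "linkedin.com", "researchgate.net", "huggingface.co"]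

def pvBaseB (first_author paper_title : String) (aliases : Option (List String)) (include_notable : Bool) : List String :=
  (first_author :: (aliases.getD [])).foldl (fun base nm =>
    let name_q := pvFmtName nm
    let name_paper_q := pvFmtNamePaper nm paper_title
    let base := pvPLATFORM_QUERIES.foldl (fun b tpl =>
      b ++ [pvFormat tpl (if pvNAME_ONLY_SITES.any (fun s => PySem.Str.isIn s tpl) then
        name_q else name_paper_q)]) base
    if include_notable then
      pvNOTABLE_QUERIES.foldl (fun b tpl => b ++ [pvFormat tpl name_q]) base
    else base) []

-- minimal priority key 0-5 of a query (Source B's `key`)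
def pvKey (pt q : String) : Nat :=
  let title_in := PySem.Str.isIn pt q
  let academic := pvACADEMIC_SITES.any (fun s => PySem.Str.isIn s q)
  if (pvPERSONAL_SITES.any (fun s => PySem.Str.isIn s q)) && title_in then 0
  else if academic && title_in then 1
  else if (pvEDU_SITES.any (fun s => PySem.Str.isIn s q)) && title_in then 2
  else if academic && !title_in && !(pvNOTABLE_3.any (fun n => PySem.Str.isIn n q)) then 3
  else if pvNOTABLE_5.any (fun n => PySem.Str.isIn n q) then 4
  else 5

def build_author_queries_alt (first_author : String) (paper_title : String) (aliases : Option (List String)) (include_notable : Bool) : List String :=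
  let base := pvBaseB first_author paper_title aliases include_notable
  -- buckets[key(q)].append(q)  (pvKey is always < 6, so getD/set is exactly buckets[key(q)])
  let buckets : List (List String) := base.foldl
    (fun bk q => bk.set (pvKey paper_title q) ((bk.getD (pvKey paper_title q) []) ++ [q]))
    [[], [], [], [], [], []]
  (buckets.foldl
    (fun st bucket => bucket.foldl
      (fun st q =>
        if !(PySem.Set.contains st.1 q) && st.2.length < 150 then
          (PySem.Set.add st.1 q, st.2 ++ [q])
        else st) st)
    ((PySem.Set.empty : PySem.Set String), ([] : List String))).2

-- ===== PRECONDITION & SPEC =====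
def Spec_build_author_queries (first_author : String) (paper_title : String) (aliases : Option (List String)) (include_notable : Bool) (out : List String) : Prop := out = build_author_queries_alt first_author paper_title aliases include_notable
instance (first_author : String) (paper_title : String) (aliases : Option (List String)) (include_notable : Bool) (out : List String) : Decidable (Spec_build_author_queries first_author paper_title aliases include_notable out) := by unfold Spec_build_author_queries; infer_instance

-- ===== CLAIM (what is proved, stated in full; the proofs are below) =====
def Claim_equal_build_author_queries : Prop := ∀ (first_author : String) (paper_title : String) (aliases : Option (List String)) (include_notable : Bool), Dom_build_author_queries first_author paper_title aliases include_notable → Spec_build_author_queries first_author paper_title aliases include_notable (build_author_queries first_author paper_title aliases include_notable)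

-- ===== LEMMAS AND PROOFS =====

-- the two generation passes build the same list
lemma pvBase_eq (fa pt : String) (al : Option (List String)) (inc : Bool) :
    pvBaseA fa pt al inc = pvBaseB fa pt al inc := by
  unfold pvBaseA pvBaseB
  apply PySem.List.foldl_congr_mem
  intro base nm _
  dsimp only
  have hinner : ∀ (b : List String),
      pvPLATFORM_QUERIES.foldl (fun b tpl =>
        if PySem.Str.isIn "x.com" tpl || PySem.Str.isIn "twitter.com" tpl ||
           PySem.Str.isIn "linkedin.com" tpl || PySem.Str.isIn "researchgate.net" tpl ||
           PySem.Str.isIn "huggingface.co" tpl then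
          b ++ [pvFormat tpl (pvFmtName nm)]
        else
          b ++ [pvFormat tpl (pvFmtNamePaper nm pt)]) b
      = pvPLATFORM_QUERIES.foldl (fun b tpl =>
        b ++ [pvFormat tpl (if pvNAME_ONLY_SITES.any (fun s => PySem.Str.isIn s tpl) then
          pvFmtName nm else pvFmtNamePaper nm pt)]) b := by
    intro b
    apply PySem.List.foldl_congr_mem
    intro b' tpl _
    cases h1 : PySem.Str.isIn "x.com" tpl <;>
    cases h2 : PySem.Str.isIn "twitter.com" tpl <;>
    cases h3 : PySem.Str.isIn "linkedin.com" tpl <;>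
    cases h4 : PySem.Str.isIn "researchgate.net" tpl <;>
    cases h5 : PySem.Str.isIn "huggingface.co" tpl <;>
    simp only [pvNAME_ONLY_SITES, List.any_cons, List.any_nil, h1, h2, h3, h4, h5,
      Bool.or_false, Bool.false_or, Bool.or_true, Bool.true_or, if_true, if_false,
      Bool.false_eq_true, ite_false, ite_true]
  rw [hinner]

-- the dedup/cap step on the bare output list (seen and out always hold the same elements)
def pvG (out : List String) (q : String) : List String :=
  if !(out.contains q) && out.length < 150 then out ++ [q] else out

-- the merge fold keeps seen = out, so it collapses to pvG on the output component
lemma pvMerge_pair (L : List String) (out : List String) :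
    L.foldl (fun (st : PySem.Set String × List String) q =>
      if !(PySem.Set.contains st.1 q) && st.2.length < 150 then
        (PySem.Set.add st.1 q, st.2 ++ [q]) else st) (out, out)
    = (L.foldl pvG out, L.foldl pvG out) := by
  induction L generalizing out with
  | nil => rfl
  | cons q t ih =>
      simp only [List.foldl_cons]
      by_cases hc : out.contains q = true
      · have hm : q ∈ out := by simpa using hc
        have h1 : pvG out q = out := by unfold pvG; simp [hm]
        have h2 : (!(PySem.Set.contains out q) && decide (out.length < 150)) = false := by
          simp [PySem.Set.contains, hm]
        rw [show (if (!(PySem.Set.contains out q) && decide (out.length < 150)) = true then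
            (PySem.Set.add out q, out ++ [q]) else (out, out)) = (out, out) from by rw [h2]; simp]
        rw [ih out, h1]
      · have hm : q ∉ out := by simpa using hc
        by_cases hl : out.length < 150
        · have h1 : pvG out q = out ++ [q] := by unfold pvG; simp [hm, hl]
          have h2 : (!(PySem.Set.contains out q) && decide (out.length < 150)) = true := by
            simp [PySem.Set.contains, hm, hl]
          have h3 : PySem.Set.add out q = out ++ [q] := by
            unfold PySem.Set.add PySem.Set.contains; simp [hm]
          rw [show (if (!(PySem.Set.contains out q) && decide (out.length < 150)) = true then
              (PySem.Set.add out q, out ++ [q]) else (out, out)) = (out ++ [q], out ++ [q]) from by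
            rw [h2, h3]; simp]
          rw [ih (out ++ [q]), h1]
        · have h1 : pvG out q = out := by unfold pvG; simp [hl]
          have h2 : (!(PySem.Set.contains out q) && decide (out.length < 150)) = false := by
            simp [hl]
          rw [show (if (!(PySem.Set.contains out q) && decide (out.length < 150)) = true then
              (PySem.Set.add out q, out ++ [q]) else (out, out)) = (out, out) from by rw [h2]; simp]
          rw [ih out, h1]

lemma pvG_prefix (out : List String) (q : String) : out <+: pvG out q := by
  unfold pvG; split
  · exact ⟨[q], rfl⟩
  · exact List.prefix_rfl

lemma pvFoldG_prefix (L : List String) (out : List String) : out <+: L.foldl pvG out := by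
  induction L generalizing out with
  | nil => exact List.prefix_rfl
  | cons q t ih => exact (pvG_prefix out q).trans (ih _)

-- skip lemma: elements already present (or arriving once the cap is reached) may be dropped
lemma pvFoldG_filter (Y : List String) (p : String → Bool) (out : List String)
    (h : ∀ y ∈ Y, p y = false → out.contains y = true ∨ 150 ≤ out.length) :
    Y.foldl pvG out = (Y.filter p).foldl pvG out := by
  induction Y generalizing out with
  | nil => rfl
  | cons y t ih =>
      by_cases hp : p y = true
      · simp only [List.filter_cons, hp, if_pos, List.foldl_cons]
        apply ih
        intro z hz hpz
        rcases h z (List.mem_cons_of_mem _ hz) hpz with hc | hl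
        · left
          rcases pvG_prefix out y with ⟨s, hs⟩
          rw [← hs]
          have hm : z ∈ out := by simpa using hc
          simp [hm]
        · right
          calc 150 ≤ out.length := hl
            _ ≤ (pvG out y).length := (pvG_prefix out y).length_le
      · have hp' : p y = false := by simpa using hp
        have hstep : pvG out y = out := by
          unfold pvG
          rcases h y List.mem_cons_self hp' with hc | hl
          · have hm : y ∈ out := by simpa using hc
            simp [hm]
          · simp [Nat.not_lt.mpr hl]
        simp only [List.filter_cons, hp', List.foldl_cons, hstep]
        apply ih
        intro z hz hpz
        exact h z (List.mem_cons_of_mem _ hz) hpz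

-- every processed element ends up in the output unless the cap was reached
lemma pvFoldG_mem (L : List String) (out : List String) (y : String) (hy : y ∈ L) :
    (L.foldl pvG out).contains y = true ∨ 150 ≤ (L.foldl pvG out).length := by
  induction L generalizing out with
  | nil => cases hy
  | cons q t ih =>
      rcases List.mem_cons.mp hy with rfl | hy'
      · have hstep : (pvG out y).contains y = true ∨ 150 ≤ (pvG out y).length := by
          unfold pvG
          by_cases hc : y ∈ out
          · left; split <;> simp_all
          · by_cases hl : out.length < 150
            · left; simp [hc, hl]
            · right; simp [hl, Nat.not_lt.mp hl]
        rcases pvFoldG_prefix t (pvG out y) with ⟨s, hs⟩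
        simp only [List.foldl_cons, ← hs]
        rcases hstep with hc | hl
        · left; simp only [List.contains_append]; simp at hc ⊢; exact Or.inl hc
        · right
          calc 150 ≤ (pvG out y).length := hl
            _ ≤ ((pvG out y) ++ s).length := by simp
      · simp only [List.foldl_cons]
        exact ih (pvG out q) hy'

-- Bool-level relations between A's bucket predicates and B's minimal key
lemma pvKey_facts (pt q : String) :
    ((pvP0 pt q = true) ↔ pvKey pt q = 0) ∧
    (pvP1 pt q = true → pvKey pt q ≤ 1) ∧ (pvKey pt q = 1 → pvP1 pt q = true) ∧
    (pvP2 pt q = true → pvKey pt q ≤ 2) ∧ (pvKey pt q = 2 → pvP2 pt q = true) ∧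
    (pvP3 pt q = true → pvKey pt q ≤ 3) ∧ (pvKey pt q = 3 → pvP3 pt q = true) ∧
    (pvP4 q = true → pvKey pt q ≤ 4) ∧ (pvKey pt q = 4 → pvP4 q = true) ∧
    ((pvKey pt q = 5) ↔ (pvP0 pt q = false ∧ pvP1 pt q = false ∧ pvP2 pt q = false ∧
        pvP3 pt q = false ∧ pvP4 q = false)) := by
  unfold pvP0 pvP1 pvP2 pvP3 pvP4 pvKey pvPERSONAL_SITES pvACADEMIC_SITES pvEDU_SITES pvNOTABLE_3 pvNOTABLE_5
  generalize (["github.io", "github.com", "personal", "homepage", "x.com", "twitter.com",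
    "linkedin.com", "researchgate.net", "huggingface.co"].any (fun site => PySem.Str.isIn site q)) = A
  generalize (["openreview.net", "semanticscholar.org", "scholar.google.com", "orcid.org"].any
    (fun site => PySem.Str.isIn site q)) = C
  generalize (["site:edu", "site:ac."].any (fun site => PySem.Str.isIn site q)) = E
  generalize (["award", "fellow", "best paper"].any (fun notable => PySem.Str.isIn notable q)) = N3
  generalize (["award", "fellow", "best paper", "rising star", "keynote"].any
    (fun notable => PySem.Str.isIn notable q)) = N5
  generalize (PySem.Str.isIn pt q) = T
  cases A <;> cases C <;> cases E <;> cases N3 <;> cases N5 <;> cases T <;> simp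

lemma pvKey_lt_6 (pt q : String) : pvKey pt q < 6 := by
  unfold pvKey
  dsimp only
  split_ifs <;> omega

-- the bucketing fold computes the six key-filtered sublists
lemma pvBuckets_go (pt : String) (L : List String) (a0 a1 a2 a3 a4 a5 : List String) :
    L.foldl (fun bk q => bk.set (pvKey pt q) ((bk.getD (pvKey pt q) []) ++ [q]))
      [a0, a1, a2, a3, a4, a5]
    = [a0 ++ L.filter (fun q => pvKey pt q == 0), a1 ++ L.filter (fun q => pvKey pt q == 1),
       a2 ++ L.filter (fun q => pvKey pt q == 2), a3 ++ L.filter (fun q => pvKey pt q == 3),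
       a4 ++ L.filter (fun q => pvKey pt q == 4), a5 ++ L.filter (fun q => pvKey pt q == 5)] := by
  induction L generalizing a0 a1 a2 a3 a4 a5 with
  | nil => simp
  | cons q t ih =>
      have h6 := pvKey_lt_6 pt q
      have hk : pvKey pt q = 0 ∨ pvKey pt q = 1 ∨ pvKey pt q = 2 ∨ pvKey pt q = 3 ∨
          pvKey pt q = 4 ∨ pvKey pt q = 5 := by omega
      simp only [List.foldl_cons]
      rcases hk with hk | hk | hk | hk | hk | hk
      · rw [hk]
        show List.foldl _ [a0 ++ [q], a1, a2, a3, a4, a5] t = _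
        rw [ih]
        simp [hk]
      · rw [hk]
        show List.foldl _ [a0, a1 ++ [q], a2, a3, a4, a5] t = _
        rw [ih]
        simp [hk]
      · rw [hk]
        show List.foldl _ [a0, a1, a2 ++ [q], a3, a4, a5] t = _
        rw [ih]
        simp [hk]
      · rw [hk]
        show List.foldl _ [a0, a1, a2, a3 ++ [q], a4, a5] t = _
        rw [ih]
        simp [hk]
      · rw [hk]
        show List.foldl _ [a0, a1, a2, a3, a4 ++ [q], a5] t = _
        rw [ih]
        simp [hk]
      · rw [hk]
        show List.foldl _ [a0, a1, a2, a3, a4, a5 ++ [q]] t = _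
        rw [ih]
        simp [hk]

lemma pvBuckets_eq (pt : String) (L : List String) :
    L.foldl (fun bk q => bk.set (pvKey pt q) ((bk.getD (pvKey pt q) []) ++ [q]))
      [[], [], [], [], [], []]
    = [L.filter (fun q => pvKey pt q == 0), L.filter (fun q => pvKey pt q == 1),
       L.filter (fun q => pvKey pt q == 2), L.filter (fun q => pvKey pt q == 3),
       L.filter (fun q => pvKey pt q == 4), L.filter (fun q => pvKey pt q == 5)] := by
  simpa using pvBuckets_go pt L [] [] [] [] [] []

-- replacing one priority segment by its key-filtered form: queries of the segment whose
-- minimal key is smaller were already delivered by an earlier segment (or the cap is hit)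
lemma pvSegment (pt : String) (base O : List String) (i : Nat) (P : String → Bool)
    (hle : ∀ q, P q = true → pvKey pt q ≤ i)
    (hback : ∀ q, pvKey pt q = i → P q = true)
    (hpre : ∀ q ∈ base, pvKey pt q < i → O.contains q = true ∨ 150 ≤ O.length) :
    List.foldl pvG O (base.filter P)
    = List.foldl pvG O (base.filter (fun q => pvKey pt q == i)) := by
  rw [pvFoldG_filter (base.filter P) (fun q => pvKey pt q == i)]
  · congr 1
    rw [List.filter_filter]
    apply List.filter_congr
    intro q _
    cases hk : (pvKey pt q == i) with
    | true =>
        have : P q = true := hback q (by simpa using hk)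
        simp [this]
    | false => simp
  · intro y hy hpy
    have hyb : y ∈ base := (List.mem_filter.mp hy).1
    have hP : P y = true := (List.mem_filter.mp hy).2
    have hklt : pvKey pt y < i := by
      have h1 := hle y hP
      have h2 : pvKey pt y ≠ i := by simpa using hpy
      omega
    exact hpre y hyb hklt

-- ===== VERDICT (by name: the statement is the Claim_ definition above) =====
theorem build_author_queries_spec : Claim_equal_build_author_queries := by
  intro fa pt al inc _
  unfold Spec_build_author_queries build_author_queries build_author_queries_alt
  rw [← pvBase_eq]
  dsimp only
  generalize pvBaseA fa pt al inc = base
  rw [pvBuckets_eq pt base]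
  rw [show (PySem.Set.empty : PySem.Set String) = ([] : List String) from rfl]
  rw [← List.foldl_flatten, ← List.foldl_flatten]
  rw [pvMerge_pair, pvMerge_pair]
  dsimp only
  simp only [List.flatten_cons, List.flatten_nil, List.append_nil, List.foldl_append]
  -- notation below: P i = base.filter (A's i-th predicate), G i = base.filter (pvKey == i)
  have hfacts := fun q => pvKey_facts pt q
  -- priority_5 is exactly the key-5 bucket
  have e5 : base.filter (fun q =>
      !((base.filter (fun q => pvP0 pt q) ++ base.filter (fun q => pvP1 pt q) ++
         base.filter (fun q => pvP2 pt q) ++ base.filter (fun q => pvP3 pt q) ++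
         base.filter (fun q => pvP4 q)).contains q))
      = base.filter (fun q => pvKey pt q == 5) := by
    apply List.filter_congr
    intro q hq
    have h6 := pvKey_lt_6 pt q
    have hf := pvKey_facts pt q
    by_cases h5 : pvKey pt q = 5
    · have hall := hf.2.2.2.2.2.2.2.2.2.mp h5
      have hc : ¬ (q ∈ base.filter (fun q => pvP0 pt q) ++ base.filter (fun q => pvP1 pt q) ++
          base.filter (fun q => pvP2 pt q) ++ base.filter (fun q => pvP3 pt q) ++
          base.filter (fun q => pvP4 q)) := by
        simp [List.mem_append, List.mem_filter, hall.1, hall.2.1, hall.2.2.1,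
          hall.2.2.2.1, hall.2.2.2.2]
      simp [h5, List.mem_append, List.mem_filter, hall.1, hall.2.1, hall.2.2.1,
        hall.2.2.2.1, hall.2.2.2.2]
    · have hne : (pvKey pt q == 5) = false := by simpa using h5
      have hk : pvKey pt q = 0 ∨ pvKey pt q = 1 ∨ pvKey pt q = 2 ∨ pvKey pt q = 3 ∨
          pvKey pt q = 4 := by omega
      rcases hk with hk | hk | hk | hk | hk
      · have hp := hf.1.mpr hk
        simp [hne, List.mem_append, List.mem_filter, hq, hp]
      · have hp := hf.2.2.1 hk
        simp [hne, List.mem_append, List.mem_filter, hq, hp]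
      · have hp := hf.2.2.2.2.1 hk
        simp [hne, List.mem_append, List.mem_filter, hq, hp]
      · have hp := hf.2.2.2.2.2.2.1 hk
        simp [hne, List.mem_append, List.mem_filter, hq, hp]
      · have hp := hf.2.2.2.2.2.2.2.2.1 hk
        simp [hne, List.mem_append, List.mem_filter, hq, hp]
  rw [e5]
  -- priority_0 is exactly the key-0 bucket
  have e0 : base.filter (fun q => pvP0 pt q) = base.filter (fun q => pvKey pt q == 0) := by
    apply List.filter_congr
    intro q _
    have hf := pvKey_facts pt q
    cases hp : pvP0 pt q with
    | true => have := hf.1.mp hp; simp [this]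
    | false =>
        have hne : pvKey pt q ≠ 0 := by
          intro h
          have := hf.1.mpr h
          rw [hp] at this
          exact Bool.false_ne_true this
        simp [hne]
  rw [e0]
  have e1 : List.foldl pvG (List.foldl pvG [] (base.filter (fun q => pvKey pt q == 0))) (base.filter (fun q => pvP1 pt q))
      = List.foldl pvG (List.foldl pvG [] (base.filter (fun q => pvKey pt q == 0))) (base.filter (fun q => pvKey pt q == 1)) := by
    apply pvSegment pt base _ 1 _ (fun q h => (pvKey_facts pt q).2.1 h)
      (fun q h => (pvKey_facts pt q).2.2.1 h)
    intro q hq hklt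
    have hmem : q ∈ (base.filter (fun q => pvKey pt q == 0)) := by
      have hk6 : pvKey pt q < 1 := hklt
      have hcase : pvKey pt q = 0 := by omega
      simp [List.mem_filter, hq, hcase]
    exact pvFoldG_mem (base.filter (fun q => pvKey pt q == 0)) [] q hmem
  rw [e1]
  have e2 : List.foldl pvG (List.foldl pvG (List.foldl pvG [] (base.filter (fun q => pvKey pt q == 0))) (base.filter (fun q => pvKey pt q == 1))) (base.filter (fun q => pvP2 pt q))
      = List.foldl pvG (List.foldl pvG (List.foldl pvG [] (base.filter (fun q => pvKey pt q == 0))) (base.filter (fun q => pvKey pt q == 1))) (base.filter (fun q => pvKey pt q == 2)) := by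
    apply pvSegment pt base _ 2 _ (fun q h => (pvKey_facts pt q).2.2.2.1 h)
      (fun q h => (pvKey_facts pt q).2.2.2.2.1 h)
    intro q hq hklt
    have hmem : q ∈ ((base.filter (fun q => pvKey pt q == 0)) ++ base.filter (fun q => pvKey pt q == 1)) := by
      have hk6 : pvKey pt q < 2 := hklt
      have hcase : pvKey pt q = 0 ∨ pvKey pt q = 1 := by omega
      rcases hcase with hk | hk
      · simp [List.mem_append, List.mem_filter, hq, hk]
      · simp [List.mem_append, List.mem_filter, hq, hk]
    rw [show (List.foldl pvG (List.foldl pvG [] (base.filter (fun q => pvKey pt q == 0))) (base.filter (fun q => pvKey pt q == 1))) = List.foldl pvG [] ((base.filter (fun q => pvKey pt q == 0)) ++ base.filter (fun q => pvKey pt q == 1)) from by simp [List.foldl_append]]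
    exact pvFoldG_mem ((base.filter (fun q => pvKey pt q == 0)) ++ base.filter (fun q => pvKey pt q == 1)) [] q hmem
  rw [e2]
  have e3 : List.foldl pvG (List.foldl pvG (List.foldl pvG (List.foldl pvG [] (base.filter (fun q => pvKey pt q == 0))) (base.filter (fun q => pvKey pt q == 1))) (base.filter (fun q => pvKey pt q == 2))) (base.filter (fun q => pvP3 pt q))
      = List.foldl pvG (List.foldl pvG (List.foldl pvG (List.foldl pvG [] (base.filter (fun q => pvKey pt q == 0))) (base.filter (fun q => pvKey pt q == 1))) (base.filter (fun q => pvKey pt q == 2))) (base.filter (fun q => pvKey pt q == 3)) := by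
    apply pvSegment pt base _ 3 _ (fun q h => (pvKey_facts pt q).2.2.2.2.2.1 h)
      (fun q h => (pvKey_facts pt q).2.2.2.2.2.2.1 h)
    intro q hq hklt
    have hmem : q ∈ (((base.filter (fun q => pvKey pt q == 0)) ++ base.filter (fun q => pvKey pt q == 1)) ++ base.filter (fun q => pvKey pt q == 2)) := by
      have hk6 : pvKey pt q < 3 := hklt
      have hcase : pvKey pt q = 0 ∨ pvKey pt q = 1 ∨ pvKey pt q = 2 := by omega
      rcases hcase with hk | hk | hk
      · simp [List.mem_append, List.mem_filter, hq, hk]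
      · simp [List.mem_append, List.mem_filter, hq, hk]
      · simp [List.mem_append, List.mem_filter, hq, hk]
    rw [show (List.foldl pvG (List.foldl pvG (List.foldl pvG [] (base.filter (fun q => pvKey pt q == 0))) (base.filter (fun q => pvKey pt q == 1))) (base.filter (fun q => pvKey pt q == 2))) = List.foldl pvG [] (((base.filter (fun q => pvKey pt q == 0)) ++ base.filter (fun q => pvKey pt q == 1)) ++ base.filter (fun q => pvKey pt q == 2)) from by simp [List.foldl_append]]
    exact pvFoldG_mem (((base.filter (fun q => pvKey pt q == 0)) ++ base.filter (fun q => pvKey pt q == 1)) ++ base.filter (fun q => pvKey pt q == 2)) [] q hmem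
  rw [e3]
  have e4 : List.foldl pvG (List.foldl pvG (List.foldl pvG (List.foldl pvG (List.foldl pvG [] (base.filter (fun q => pvKey pt q == 0))) (base.filter (fun q => pvKey pt q == 1))) (base.filter (fun q => pvKey pt q == 2))) (base.filter (fun q => pvKey pt q == 3))) (base.filter (fun q => pvP4 q))
      = List.foldl pvG (List.foldl pvG (List.foldl pvG (List.foldl pvG (List.foldl pvG [] (base.filter (fun q => pvKey pt q == 0))) (base.filter (fun q => pvKey pt q == 1))) (base.filter (fun q => pvKey pt q == 2))) (base.filter (fun q => pvKey pt q == 3))) (base.filter (fun q => pvKey pt q == 4)) := by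
    apply pvSegment pt base _ 4 _ (fun q h => (pvKey_facts pt q).2.2.2.2.2.2.2.1 h)
      (fun q h => (pvKey_facts pt q).2.2.2.2.2.2.2.2.1 h)
    intro q hq hklt
    have hmem : q ∈ ((((base.filter (fun q => pvKey pt q == 0)) ++ base.filter (fun q => pvKey pt q == 1)) ++ base.filter (fun q => pvKey pt q == 2)) ++ base.filter (fun q => pvKey pt q == 3)) := by
      have hk6 : pvKey pt q < 4 := hklt
      have hcase : pvKey pt q = 0 ∨ pvKey pt q = 1 ∨ pvKey pt q = 2 ∨ pvKey pt q = 3 := by omega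
      rcases hcase with hk | hk | hk | hk
      · simp [List.mem_append, List.mem_filter, hq, hk]
      · simp [List.mem_append, List.mem_filter, hq, hk]
      · simp [List.mem_append, List.mem_filter, hq, hk]
      · simp [List.mem_append, List.mem_filter, hq, hk]
    rw [show (List.foldl pvG (List.foldl pvG (List.foldl pvG (List.foldl pvG [] (base.filter (fun q => pvKey pt q == 0))) (base.filter (fun q => pvKey pt q == 1))) (base.filter (fun q => pvKey pt q == 2))) (base.filter (fun q => pvKey pt q == 3))) = List.foldl pvG [] ((((base.filter (fun q => pvKey pt q == 0)) ++ base.filter (fun q => pvKey pt q == 1)) ++ base.filter (fun q => pvKey pt q == 2)) ++ base.filter (fun q => pvKey pt q == 3)) from by simp [List.foldl_append]]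
    exact pvFoldG_mem ((((base.filter (fun q => pvKey pt q == 0)) ++ base.filter (fun q => pvKey pt q == 1)) ++ base.filter (fun q => pvKey pt q == 2)) ++ base.filter (fun q => pvKey pt q == 3)) [] q hmem
  rw [e4]
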